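-- pv_equiv track=rewrite | github.com/mueedurrehman/Python-Interview-Practice | AutoComplete Scores.py | getAutocompleteScores
-- ===== SOURCE A (Python) =====
-- def getAutocompleteScores(documentTitles, documentBodies, queries):
--     scores = {}
--     # Parsing the text and storing scores in a dictionary (hashtable) for quick lookup
--     for title in documentTitles:
--         words = title.split()
--         for word in words:
--             # Tried removing punctuation
--             # word = word.translate(str.maketrans('', '', string.punctuation))
--             # word = word.strip()
--             # if word != "":
--             if word not in scores:
--                 scores[word] = 10
--             else:
--                 scores[word] += 10
--
--     for body in documentBodies:
--         words = body.split()
--         for word in words: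
--             # word = word.translate(str.maketrans('', '', string.punctuation))
--             # word = word.strip()
--             # if word != "":
--             if word not in scores:
--                 scores[word] = 1
--             else:
--                 scores[word] += 1
--
--     # Building a trie to provide the autocomplete suggestions:
--     class trie_node:
--         def __init__(self):
--             self.children = {}
--             self.last = False
--
--     class trie:
--         def __init__(self):
--             self.root = trie_node()
--             self.word_list = []
--
--         def add(self, word):
--             node = self.root
--             for ch in word:
--                 if ch not in node.children:
--                     node.children[ch] = trie_node()
--                 node = node.children[ch]
--             node.last = True
--
--         def formTrie(self, words):
--             for word in words:
--                 self.add(word)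
--
--         def suggestions_build(self, node, word):
--             if node.last:
--                 self.word_list.append(word)
--
--             for ch, n in node.children.items():
--                 self.suggestions_build(n, word + ch)
--
--         def suggestionsList(self, word):
--             node = self.root
--             temp = ""
--             for ch in word:
--                 if ch not in node.children:
--                     return None
--                 temp += ch
--                 node = node.children[ch]
--             self.suggestions_build(node, temp)
--             return self.word_list
--
--     words = trie()
--     words.formTrie(scores.keys())  # Add all of the words to the trie for autocomplete purposes
--     answers = []
--     # Caching queries for efficiency in case of a repeat query
--     cache = {}
--     for query in queries:
--         if query not in cache:
--             ac_result = words.suggestionsList(query)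
--             # Query cannot autocomplete to anything. Result is 0.
--             if ac_result is None:
--                 answers.append(0)
--             else:
--                 # Find the maximum score among all autocomplete possibilities for the query
--                 max_score = 0
--                 for word in ac_result:
--                     cur_score = scores[word]
--                     if cur_score > max_score:
--                         max_score = cur_score
--                 answers.append(max_score)
--                 cache[query] = max_score
--             words.word_list = []  # resetting the trie's word_list for the next query
--         else:
--             answers.append(cache[query])
--     return answers
-- ===== SOURCE B (Python) =====
-- def getAutocompleteScores(documentTitles, documentBodies, queries):
--     scores = {}
--     for title in documentTitles:
--         for w in title.split():
--             scores[w] = scores.get(w, 0) + 10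
--     for body in documentBodies:
--         for w in body.split():
--             scores[w] = scores.get(w, 0) + 1
--     # One pass over the words: record, for every prefix of every word,
--     # the maximum score of any word carrying that prefix.
--     best = {}
--     for w, s in scores.items():
--         for i in range(len(w) + 1):
--             p = w[:i]
--             if best.get(p, 0) < s:
--                 best[p] = s
--     return [best.get(q, 0) for q in queries]
-- ===== Notes on version B (the rewrite author's own statement) =====
-- stated objective: faster
-- what changed: Replaces the per-query trie walk + DFS over the whole matching subtree with a single pass that builds a prefix->max-score dictionary over all words, so each query is one dictionary lookup.
import Mathlib
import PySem

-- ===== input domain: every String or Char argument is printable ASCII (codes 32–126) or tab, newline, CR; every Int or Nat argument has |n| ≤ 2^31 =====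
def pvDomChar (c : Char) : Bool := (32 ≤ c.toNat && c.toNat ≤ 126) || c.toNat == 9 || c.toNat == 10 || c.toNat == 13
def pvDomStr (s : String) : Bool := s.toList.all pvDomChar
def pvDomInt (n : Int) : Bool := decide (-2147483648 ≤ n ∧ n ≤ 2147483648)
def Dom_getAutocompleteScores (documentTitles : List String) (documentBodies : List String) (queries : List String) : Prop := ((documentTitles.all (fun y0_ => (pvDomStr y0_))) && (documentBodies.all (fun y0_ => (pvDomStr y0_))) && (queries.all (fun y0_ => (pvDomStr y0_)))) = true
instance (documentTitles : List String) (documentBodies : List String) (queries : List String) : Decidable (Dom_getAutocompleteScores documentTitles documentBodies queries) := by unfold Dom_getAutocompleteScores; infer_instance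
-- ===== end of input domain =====

-- B replaces A's per-query trie walk + full-subtree DFS by a prefix→max-score dictionary built
-- in one pass over the word scores, so each query is a single lookup (objective: faster).

-- ===== PORT A =====
-- A's trie: trie_node has a dict (insertion-ordered) of children and a `last` flag.
-- Encoded first-child/next-sibling: `cons c last children siblings` is one (c ↦ node) entry
-- of a children dict; a node is the pair (last, children).  Same data, single inductive.
inductive PvCh where
  | nil : PvCh
  | cons : Char → Bool → PvCh → PvCh → PvCh

-- children dict lookup: `ch not in node.children` / `node.children[ch]` (first match)
def pvChFind? : PvCh → Char → Option (Bool × PvCh)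
  | .nil, _ => none
  | .cons c b sub rest, x => if x = c then some (b, sub) else pvChFind? rest x

-- children dict store: overwrite in place, else append (Python dict semantics)
def pvChInsert : PvCh → Char → (Bool × PvCh) → PvCh
  | .nil, x, m => .cons x m.1 m.2 .nil
  | .cons c b sub rest, x, m => if x = c then .cons c m.1 m.2 rest else .cons c b sub (pvChInsert rest x m)

-- trie.add(word): walk the chars, creating missing nodes; set `last` at the end
def pvTrieAdd : (Bool × PvCh) → List Char → (Bool × PvCh)
  | (_, ch), [] => (true, ch)
  | (l, ch), c :: cs =>
      let child := (pvChFind? ch c).getD (false, .nil)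
      (l, pvChInsert ch c (pvTrieAdd child cs))

-- trie.suggestions_build: if node.last, emit `word`; then recurse over children in dict order.
-- `acc` is the word_list being appended to.
def pvSbCh : PvCh → List Char → List (List Char) → List (List Char)
  | .nil, _, acc => acc
  | .cons c b sub rest, word, acc =>
      pvSbCh rest word (pvSbCh sub (word ++ [c]) (if b then (acc ++ [word ++ [c]]) else acc))

def pvSb (n : Bool × PvCh) (word : List Char) (acc : List (List Char)) : List (List Char) :=
  pvSbCh n.2 word (if n.1 then acc ++ [word] else acc)

-- trie.suggestionsList's walk down the query: None when a char is missing
def pvWalk : (Bool × PvCh) → List Char → Option (Bool × PvCh)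
  | n, [] => some n
  | n, c :: cs =>
      match pvChFind? n.2 c with
      | none => none
      | some m => pvWalk m cs

def getAutocompleteScores (documentTitles : List String) (documentBodies : List String) (queries : List String) : List Int :=
  -- scores dict; `scores[word] += k` ported as insert of getD+k (the key is present in that branch, so getD is exact)
  let scores1 := documentTitles.foldl (fun sc title =>
    (PySem.Str.split₀ title).foldl (fun sc word =>
      if sc.contains word = false then sc.insert word 10 else sc.insert word (sc.getD word 0 + 10)) sc) PySem.Dict.empty
  let scores := documentBodies.foldl (fun sc body =>
    (PySem.Str.split₀ body).foldl (fun sc word =>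
      if sc.contains word = false then sc.insert word 1 else sc.insert word (sc.getD word 0 + 1)) sc) scores1
  -- words.formTrie(scores.keys())
  let root := scores.keys.foldl (fun t w => pvTrieAdd t w.toList) (false, PvCh.nil)
  -- query loop with the cache; `scores[word]` ported as getD (every DFS word is a key, so getD is exact)
  let step := fun (st : List Int × PySem.Dict String Int) query =>
    if st.2.contains query = false then
      match pvWalk root query.toList with
      | none => (st.1 ++ [(0 : Int)], st.2)
      | some node =>
          let acResult := pvSb node query.toList []
          let maxScore := acResult.foldl (fun mx w =>
            let cur := scores.getD (String.ofList w) 0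
            if cur > mx then cur else mx) 0
          (st.1 ++ [maxScore], st.2.insert query maxScore)
    else (st.1 ++ [st.2.getD query 0], st.2)
  (queries.foldl step ([], PySem.Dict.empty)).1

-- ===== PORT B =====
def getAutocompleteScores_alt (documentTitles : List String) (documentBodies : List String) (queries : List String) : List Int :=
  let scores1 := documentTitles.foldl (fun sc title =>
    (PySem.Str.split₀ title).foldl (fun sc w => sc.insert w (sc.getD w 0 + 10)) sc) PySem.Dict.empty
  let scores := documentBodies.foldl (fun sc body =>
    (PySem.Str.split₀ body).foldl (fun sc w => sc.insert w (sc.getD w 0 + 1)) sc) scores1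
  -- best: for every prefix of every word, the max score of a word carrying that prefix
  let best := scores.items.foldl (fun b ws =>
    (PySem.List.pyRange 0 (PySem.Str.len ws.1 + 1) 1).foldl (fun b i =>
      let p := PySem.Str.slice ws.1 none (some i)
      if b.getD p 0 < ws.2 then b.insert p ws.2 else b) b) PySem.Dict.empty
  queries.map (fun q => best.getD q 0)

-- ===== PRECONDITION & SPEC =====
def Spec_getAutocompleteScores (documentTitles : List String) (documentBodies : List String) (queries : List String) (out : List Int) : Prop := out = getAutocompleteScores_alt documentTitles documentBodies queries
instance (documentTitles : List String) (documentBodies : List String) (queries : List String) (out : List Int) : Decidable (Spec_getAutocompleteScores documentTitles documentBodies queries out) := by unfold Spec_getAutocompleteScores; infer_instance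

-- ===== CLAIM (what is proved, stated in full; the proofs are below) =====
def Claim_equal_getAutocompleteScores : Prop := ∀ (documentTitles : List String) (documentBodies : List String) (queries : List String), Dom_getAutocompleteScores documentTitles documentBodies queries → Spec_getAutocompleteScores documentTitles documentBodies queries (getAutocompleteScores documentTitles documentBodies queries)

-- ===== LEMMAS AND PROOFS =====

-- membership semantics of the trie: which words (as char lists) it contains
def pvHas : (Bool × PvCh) → List Char → Bool
  | n, [] => n.1
  | n, c :: cs =>
      match pvChFind? n.2 c with
      | none => false
      | some m => pvHas m cs

def pvChKeys : PvCh → List Char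
  | .nil => []
  | .cons c _ _ rest => c :: pvChKeys rest

-- well-formedness: children keys distinct at every level (Python dicts guarantee it)
def pvChWF : PvCh → Prop
  | .nil => True
  | .cons c _ sub rest => c ∉ pvChKeys rest ∧ pvChWF sub ∧ pvChWF rest

-- the common functional spec: max score over words having q as a prefix
def pvG (items : List (String × Int)) (q : String) : Int :=
  items.foldl (fun a p => if q.toList.isPrefixOf p.1.toList then max a p.2 else a) 0


-- ---------- children-dict lemmas ----------
theorem pvChFind?_insert (ch : PvCh) (c : Char) (m : Bool × PvCh) (x : Char) :
    pvChFind? (pvChInsert ch c m) x = if x = c then some m else pvChFind? ch x := by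
  induction ch with
  | nil => by_cases h : x = c <;> simp [pvChInsert, pvChFind?, h]
  | cons c' b sub rest ihsub ihrest =>
      by_cases hc : c = c'
      · subst hc
        by_cases h : x = c <;> simp [pvChInsert, pvChFind?, h]
      · by_cases h : x = c'
        · subst h
          simp [pvChInsert, pvChFind?, Ne.symm hc, hc]
        · simp [pvChInsert, pvChFind?, hc, h, ihrest]

theorem pvChFind?_eq_none_iff (ch : PvCh) (x : Char) :
    pvChFind? ch x = none ↔ x ∉ pvChKeys ch := by
  induction ch with
  | nil => simp [pvChFind?, pvChKeys]
  | cons c b sub rest ihsub ihrest =>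
      by_cases h : x = c <;> simp [pvChFind?, pvChKeys, h, ihrest]

theorem pvChKeys_insert (ch : PvCh) (c : Char) (m : Bool × PvCh) :
    pvChKeys (pvChInsert ch c m) = if c ∈ pvChKeys ch then pvChKeys ch else pvChKeys ch ++ [c] := by
  induction ch with
  | nil => simp [pvChInsert, pvChKeys]
  | cons c' b sub rest ihsub ihrest =>
      by_cases h : c = c'
      · subst h; simp [pvChInsert, pvChKeys]
      · simp [pvChInsert, pvChKeys, h, ihrest]
        by_cases hm : c ∈ pvChKeys rest <;> simp [hm]

theorem pvChWF_find {ch : PvCh} (h : pvChWF ch) {x : Char} {m : Bool × PvCh}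
    (hf : pvChFind? ch x = some m) : pvChWF m.2 := by
  induction ch with
  | nil => simp [pvChFind?] at hf
  | cons c b sub rest ihsub ihrest =>
      by_cases hx : x = c
      · simp [pvChFind?, hx] at hf
        obtain ⟨h1, h2, h3⟩ := h
        cases hf; exact h2
      · simp [pvChFind?, hx] at hf
        exact ihrest h.2.2 hf

theorem pvChWF_insert {ch : PvCh} (h : pvChWF ch) (c : Char) {m : Bool × PvCh}
    (hm : pvChWF m.2) : pvChWF (pvChInsert ch c m) := by
  induction ch with
  | nil => exact ⟨by simp [pvChKeys], hm, trivial⟩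
  | cons c' b sub rest ihsub ihrest =>
      obtain ⟨h1, h2, h3⟩ := h
      by_cases hx : c = c'
      · subst hx; simpa [pvChInsert, pvChWF] using ⟨h1, hm, h3⟩
      · have hk : c' ∉ pvChKeys (pvChInsert rest c m) := by
          rw [pvChKeys_insert]
          by_cases hmem : c ∈ pvChKeys rest
          · simpa [hmem] using h1
          · simp [hmem, h1]
            exact fun hh => hx hh.symm
        simp only [pvChInsert, if_neg hx]
        exact ⟨hk, h2, ihrest h3⟩

theorem pvChWF_add {n : Bool × PvCh} (h : pvChWF n.2) (w : List Char) :
    pvChWF (pvTrieAdd n w).2 := by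
  induction w generalizing n with
  | nil => obtain ⟨l, ch⟩ := n; simpa [pvTrieAdd] using h
  | cons c cs ih =>
      obtain ⟨l, ch⟩ := n
      simp only [pvTrieAdd]
      refine pvChWF_insert h c ?_
      refine ih ?_
      cases hf : pvChFind? ch c with
      | none => simp [pvChWF]
      | some m => simpa [hf] using pvChWF_find h hf

-- ---------- trie membership semantics ----------
theorem pvHas_empty (x : List Char) : pvHas (false, PvCh.nil) x = false := by
  cases x <;> simp [pvHas, pvChFind?]

theorem pvHas_add (n : Bool × PvCh) (w x : List Char) :
    pvHas (pvTrieAdd n w) x = (decide (x = w) || pvHas n x) := by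
  induction w generalizing n x with
  | nil =>
      obtain ⟨l, ch⟩ := n
      cases x <;> simp [pvTrieAdd, pvHas]
  | cons c cs ih =>
      obtain ⟨l, ch⟩ := n
      cases x with
      | nil => simp [pvTrieAdd, pvHas]
      | cons d ds =>
          by_cases hdc : d = c
          · subst hdc
            have h1 : pvHas (pvTrieAdd (l, ch) (d :: cs)) (d :: ds)
                = pvHas (pvTrieAdd ((pvChFind? ch d).getD (false, PvCh.nil)) cs) ds := by
              simp [pvTrieAdd, pvHas, pvChFind?_insert]
            rw [h1, ih]
            cases hf : pvChFind? ch d with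
            | none => simp [pvHas, hf, pvHas_empty]
            | some m => simp [pvHas, hf]
          · simp only [pvTrieAdd, pvHas, pvChFind?_insert, if_neg hdc]
            have : ¬ (d :: ds) = (c :: cs) := by simp [hdc]
            simp [this]

theorem pvHas_fold (ks : List String) (n : Bool × PvCh) (x : List Char) :
    pvHas (ks.foldl (fun t w => pvTrieAdd t w.toList) n) x
      = (ks.any (fun k => decide (x = k.toList)) || pvHas n x) := by
  induction ks generalizing n with
  | nil => simp
  | cons k ks ih =>
      simp only [List.foldl_cons, List.any_cons, ih, pvHas_add]
      cases h : pvHas n x <;> by_cases hx : x = k.toList <;> simp [hx, Bool.or_comm]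

theorem pvWalk_some_has {n m : Bool × PvCh} {q : List Char} (h : pvWalk n q = some m)
    (r : List Char) : pvHas m r = pvHas n (q ++ r) := by
  induction q generalizing n with
  | nil => simp [pvWalk] at h; subst h; rfl
  | cons c cs ih =>
      simp only [pvWalk] at h
      cases hf : pvChFind? n.2 c with
      | none => simp [hf] at h
      | some m' =>
          simp only [hf] at h
          simp [pvHas, hf, ih h]

theorem pvWalk_none_has {n : Bool × PvCh} {q : List Char} (h : pvWalk n q = none)
    (r : List Char) : pvHas n (q ++ r) = false := by
  induction q generalizing n with
  | nil => simp [pvWalk] at h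
  | cons c cs ih =>
      simp only [pvWalk] at h
      cases hf : pvChFind? n.2 c with
      | none => simp [pvHas, hf]
      | some m' =>
          simp only [hf] at h
          simp [pvHas, hf, ih h]

theorem pvWalk_WF {n m : Bool × PvCh} (h : pvChWF n.2) {q : List Char}
    (hw : pvWalk n q = some m) : pvChWF m.2 := by
  induction q generalizing n with
  | nil => simp [pvWalk] at hw; subst hw; exact h
  | cons c cs ih =>
      simp only [pvWalk] at hw
      cases hf : pvChFind? n.2 c with
      | none => simp [hf] at hw
      | some m' =>
          simp only [hf] at hw
          exact ih (pvChWF_find h hf) hw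

-- ---------- DFS (suggestions_build) lemmas ----------
theorem pvSbCh_acc (ch : PvCh) (word : List Char) (acc : List (List Char)) :
    pvSbCh ch word acc = acc ++ pvSbCh ch word [] := by
  induction ch generalizing word acc with
  | nil => simp [pvSbCh]
  | cons c b sub rest ihsub ihrest =>
      simp only [pvSbCh]
      rw [ihrest, ihsub,
          ihrest (acc := pvSbCh sub (word ++ [c]) (if b then [] ++ [word ++ [c]] else [])),
          ihsub (acc := if b then [] ++ [word ++ [c]] else [])]
      cases b <;> simp

theorem mem_pvSbCh {ch : PvCh} (h : pvChWF ch) (word x : List Char) :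
    x ∈ pvSbCh ch word [] ↔
      ∃ c cs, (∃ m, pvChFind? ch c = some m ∧ pvHas m cs = true) ∧ x = word ++ c :: cs := by
  induction ch generalizing word with
  | nil => simp [pvSbCh, pvChFind?]
  | cons c b sub rest ihsub ihrest =>
      obtain ⟨h1, h2, h3⟩ := h
      simp only [pvSbCh]
      rw [pvSbCh_acc rest, pvSbCh_acc sub]
      simp only [List.mem_append]
      constructor
      · intro hx
        rcases hx with (hx | hx) | hx
        · -- x = word ++ [c] (emitted because b = true)
          rcases b with _ | _
          · simp at hx
          · simp at hx
            exact ⟨c, [], ⟨(true, sub), by simp [pvChFind?], by simp [pvHas]⟩, by simp [hx]⟩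
        · -- x in DFS of sub
          rw [ihsub h2] at hx
          obtain ⟨d, ds, ⟨m, hf, hm⟩, hx⟩ := hx
          exact ⟨c, d :: ds, ⟨(b, sub), by simp [pvChFind?], by simp [pvHas, hf, hm]⟩,
            by simp [hx]⟩
        · -- x in DFS of rest
          rw [ihrest h3] at hx
          obtain ⟨d, ds, ⟨m, hf, hm⟩, hx⟩ := hx
          have hdc : d ≠ c := by
            rintro rfl
            have : d ∈ pvChKeys rest := by
              by_contra hmem
              rw [← pvChFind?_eq_none_iff] at hmem
              simp [hmem] at hf
            exact h1 this
          exact ⟨d, ds, ⟨m, by simp [pvChFind?, hdc, hf], hm⟩, hx⟩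
      · rintro ⟨d, ds, ⟨m, hf, hm⟩, rfl⟩
        by_cases hdc : d = c
        · subst hdc
          simp only [pvChFind?] at hf
          cases hf
          cases ds with
          | nil =>
              simp only [pvHas] at hm
              simp [hm]
          | cons e es =>
              simp only [pvHas] at hm
              cases hfe : pvChFind? sub e with
              | none => simp [hfe] at hm
              | some m' =>
                  simp only [hfe] at hm
                  refine Or.inl (Or.inr ?_)
                  rw [ihsub h2]
                  exact ⟨e, es, ⟨m', hfe, hm⟩, by simp⟩
        · simp only [pvChFind?, if_neg hdc] at hf
          refine Or.inr ?_
          rw [ihrest h3]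
          exact ⟨d, ds, ⟨m, hf, hm⟩, rfl⟩

theorem mem_pvSb {n : Bool × PvCh} (h : pvChWF n.2) (word x : List Char) :
    x ∈ pvSb n word [] ↔ ∃ r, pvHas n r = true ∧ x = word ++ r := by
  obtain ⟨l, ch⟩ := n
  simp only [pvSb]
  rw [pvSbCh_acc]
  constructor
  · intro hx
    simp only [List.mem_append] at hx
    rcases hx with hx | hx
    · cases l
      · simp at hx
      · simp at hx
        exact ⟨[], by simp [pvHas], by simp [hx]⟩
    · rw [mem_pvSbCh h] at hx
      obtain ⟨c, cs, ⟨m, hf, hm⟩, hx⟩ := hx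
      exact ⟨c :: cs, by simp [pvHas, hf, hm], hx⟩
  · rintro ⟨r, hr, rfl⟩
    cases r with
    | nil =>
        simp only [pvHas] at hr
        simp [hr]
    | cons c cs =>
        simp only [pvHas] at hr
        cases hf : pvChFind? ch c with
        | none => simp [hf] at hr
        | some m =>
            simp only [hf] at hr
            refine List.mem_append.2 (Or.inr ?_)
            rw [mem_pvSbCh h]
            exact ⟨c, cs, ⟨m, hf, hr⟩, rfl⟩

theorem nodup_pvSbCh {ch : PvCh} (h : pvChWF ch) (word : List Char) :
    (pvSbCh ch word []).Nodup := by
  induction ch generalizing word with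
  | nil => simp [pvSbCh]
  | cons c b sub rest ihsub ihrest =>
      obtain ⟨h1, h2, h3⟩ := h
      simp only [pvSbCh]
      rw [pvSbCh_acc rest, pvSbCh_acc sub]
      rw [List.nodup_append, List.nodup_append]
      refine ⟨⟨by cases b <;> simp, ihsub h2 _, ?_⟩, ihrest h3 _, ?_⟩
      · intro a ha b' hb hab
        cases b with
        | false => simp at ha
        | true =>
            simp at ha
            rw [mem_pvSbCh h2] at hb
            obtain ⟨d, ds, _, rfl⟩ := hb
            subst ha
            simp at hab
      · intro a ha b' hb
        rw [mem_pvSbCh h3] at hb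
        obtain ⟨d, ds, ⟨m, hf, _⟩, rfl⟩ := hb
        have hdmem : d ∈ pvChKeys rest := by
          by_contra hmem
          rw [← pvChFind?_eq_none_iff] at hmem
          simp [hmem] at hf
        have hdc : d ≠ c := fun hh => h1 (hh ▸ hdmem)
        have ha' : ∃ cs : List Char, a = word ++ c :: cs := by
          rcases List.mem_append.1 ha with ha | ha
          · cases b
            · simp at ha
            · simp at ha; exact ⟨[], by simp [ha]⟩
          · rw [mem_pvSbCh h2] at ha
            obtain ⟨e, es, _, rfl⟩ := ha
            exact ⟨e :: es, by simp⟩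
        obtain ⟨cs, rfl⟩ := ha'
        simp [hdc.symm]

theorem nodup_pvSb {n : Bool × PvCh} (h : pvChWF n.2) (word : List Char) :
    (pvSb n word []).Nodup := by
  obtain ⟨l, ch⟩ := n
  simp only [pvSb]
  rw [pvSbCh_acc]
  rw [List.nodup_append]
  refine ⟨by cases l <;> simp, nodup_pvSbCh h _, ?_⟩
  intro a ha b' hb
  cases l
  · simp at ha
  · simp at ha
    rw [mem_pvSbCh h] at hb
    obtain ⟨d, ds, _, rfl⟩ := hb
    subst ha
    simp

-- ---------- B-side: the prefix→max dictionary ----------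
theorem pvIfMax (a b : Int) : (if b > a then b else a) = max a b := by
  rcases lt_or_ge a b with h | h
  · simp [h, max_eq_right h.le]
  · simp [not_lt.2 h, max_eq_left h]

theorem pvBestInnerGen (is : List Nat) (w : String) (s : Int) (b : PySem.Dict String Int) (q : String) :
    ((is.foldl (fun b k =>
        if b.getD (String.ofList (w.toList.take k)) 0 < s
        then b.insert (String.ofList (w.toList.take k)) s else b) b).getD q 0)
      = if (∃ k ∈ is, w.toList.take k = q.toList) then max (b.getD q 0) s else b.getD q 0 := by
  induction is generalizing b with
  | nil => simp
  | cons i is ih =>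
      simp only [List.foldl_cons]
      rw [ih]
      by_cases hq : String.ofList (w.toList.take i) = q
      · have hql : w.toList.take i = q.toList := by
          rw [← hq, String.toList_ofList]
        by_cases htail : ∃ k ∈ is, w.toList.take k = q.toList
        · simp only [if_pos htail]
          have hmem : ∃ k ∈ i :: is, w.toList.take k = q.toList := ⟨i, by simp, hql⟩
          rw [if_pos hmem]
          by_cases hlt : b.getD (String.ofList (w.toList.take i)) 0 < s
          · rw [if_pos hlt, PySem.Dict.getD_insert]
            rw [if_pos hq.symm]
            have : b.getD q 0 < s := by rw [← hq]; exact hlt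
            omega
          · rw [if_neg hlt]
        · simp only [if_neg htail]
          have hmem : ∃ k ∈ i :: is, w.toList.take k = q.toList := ⟨i, by simp, hql⟩
          rw [if_pos hmem]
          by_cases hlt : b.getD (String.ofList (w.toList.take i)) 0 < s
          · rw [if_pos hlt, PySem.Dict.getD_insert, if_pos hq.symm]
            have : b.getD q 0 < s := by rw [← hq]; exact hlt
            omega
          · rw [if_neg hlt]
            have : ¬ b.getD q 0 < s := by rw [← hq]; exact hlt
            omega
      · have hgd : ∀ d : PySem.Dict String Int,
            ((if d.getD (String.ofList (w.toList.take i)) 0 < s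
              then d.insert (String.ofList (w.toList.take i)) s else d).getD q 0) = d.getD q 0 := by
          intro d
          by_cases hlt : d.getD (String.ofList (w.toList.take i)) 0 < s
          · rw [if_pos hlt, PySem.Dict.getD_insert, if_neg (fun hh => hq hh.symm)]
          · rw [if_neg hlt]
        have hqt : w.toList.take i ≠ q.toList := fun hh => hq (by rw [hh, String.ofList_toList])
        have hcond : (∃ k ∈ i :: is, w.toList.take k = q.toList) ↔ (∃ k ∈ is, w.toList.take k = q.toList) := by
          constructor
          · rintro ⟨k, hk, hkeq⟩
            rcases List.mem_cons.1 hk with rfl | hk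
            · exact absurd hkeq hqt
            · exact ⟨k, hk, hkeq⟩
          · rintro ⟨k, hk, hkeq⟩
            exact ⟨k, List.mem_cons_of_mem _ hk, hkeq⟩
        simp only [hgd, hcond]

theorem pvExistsTake (w q : List Char) :
    (∃ k ∈ List.range (w.length + 1), w.take k = q) ↔ q.isPrefixOf w = true := by
  rw [List.isPrefixOf_iff_prefix]
  constructor
  · rintro ⟨k, _, rfl⟩
    exact List.take_prefix k w
  · intro h
    refine ⟨q.length, ?_, ?_⟩
    · simp [h.length_le]
    · exact (List.prefix_iff_eq_take.1 h).symm

theorem pvSliceTake (w : String) (k : Nat) :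
    PySem.Str.slice w none (some (k:Int)) = String.ofList (w.toList.take k) := by
  have h : (PySem.Str.slice w none (some (k:Int))).toList = w.toList.take k := by
    simp [PySem.Str.toList_slice, PySem.Chars.slice_eq_listSlice, PySem.List.slice_to_natCast]
  rw [← h, String.ofList_toList]

theorem pvBestOuter (l : List (String × Int)) (b : PySem.Dict String Int) (q : String) :
    ((l.foldl (fun b ws =>
        (PySem.List.pyRange 0 (PySem.Str.len ws.1 + 1) 1).foldl (fun b i =>
          if b.getD (PySem.Str.slice ws.1 none (some i)) 0 < ws.2
          then b.insert (PySem.Str.slice ws.1 none (some i)) ws.2 else b) b) b).getD q 0)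
      = l.foldl (fun a p => if q.toList.isPrefixOf p.1.toList = true then max a p.2 else a) (b.getD q 0) := by
  induction l generalizing b with
  | nil => rfl
  | cons ws l ih =>
      simp only [List.foldl_cons]
      rw [ih]
      congr 1
      -- the inner loop over range(len(w)+1) updates exactly the prefixes of ws.1
      have hrange : PySem.List.pyRange 0 (PySem.Str.len ws.1 + 1) 1
          = (List.range (ws.1.toList.length + 1)).map (fun k : Nat => (k : Int)) := by
        rw [PySem.List.pyRange_one]
        have h1 : ((PySem.Str.len ws.1 + 1) - 0).toNat = ws.1.toList.length + 1 := by
          simp [PySem.Str.len_eq]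
        rw [h1]
        apply List.map_congr_left
        intro k _
        omega
      rw [hrange, List.foldl_map]
      have hstep : (fun (b : PySem.Dict String Int) (k : Nat) =>
          if b.getD (PySem.Str.slice ws.1 none (some (k:Int))) 0 < ws.2
          then b.insert (PySem.Str.slice ws.1 none (some (k:Int))) ws.2 else b)
          = (fun (b : PySem.Dict String Int) (k : Nat) =>
          if b.getD (String.ofList (ws.1.toList.take k)) 0 < ws.2
          then b.insert (String.ofList (ws.1.toList.take k)) ws.2 else b) := by
        funext b k
        rw [pvSliceTake]
      rw [hstep, pvBestInnerGen]
      simp only [pvExistsTake]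

-- scores.keys stays duplicate-free through the nested insert loops
theorem pvScoresNodup (l : List String) (g : String → List String) (f : PySem.Dict String Int → String → Int)
    (d : PySem.Dict String Int) (h : d.keys.Nodup) :
    (l.foldl (fun sc t => (g t).foldl (fun sc w => sc.insert w (f sc w)) sc) d).keys.Nodup := by
  induction l generalizing d with
  | nil => exact h
  | cons t l ih =>
      exact ih _ (PySem.Dict.nodup_keys_foldl_insert (g t) f d h)

theorem pvWF_fold (ks : List String) (n : Bool × PvCh) (h : pvChWF n.2) :
    pvChWF ((ks.foldl (fun t w => pvTrieAdd t w.toList) n).2) := by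
  induction ks generalizing n with
  | nil => exact h
  | cons k ks ih => exact ih _ (pvChWF_add h k.toList)

-- A's per-query answer (walk + DFS + running max), as a function
def pvAns (scores : PySem.Dict String Int) (root : Bool × PvCh) (q : String) : Int :=
  match pvWalk root q.toList with
  | none => 0
  | some node =>
      (pvSb node q.toList []).foldl (fun mx w =>
        if scores.getD (String.ofList w) 0 > mx then scores.getD (String.ofList w) 0 else mx) 0

-- core: A's answer is the max score over words having q as a prefix, i.e. pvG
theorem pvAns_eq (scores : PySem.Dict String Int) (hn : scores.keys.Nodup) (q : String) :
    pvAns scores (scores.keys.foldl (fun t w => pvTrieAdd t w.toList) (false, PvCh.nil)) q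
      = pvG scores.items q := by
  set root := scores.keys.foldl (fun t w => pvTrieAdd t w.toList) (false, PvCh.nil) with hroot
  have hWF : pvChWF root.2 := pvWF_fold _ _ trivial
  have hHas : ∀ x, pvHas root x = scores.keys.any (fun k => decide (x = k.toList)) := by
    intro x
    rw [hroot, pvHas_fold, pvHas_empty, Bool.or_false]
  have hG : pvG scores.items q
      = (scores.keys.filter (fun k => q.toList.isPrefixOf k.toList)).foldl
          (fun a k => max a (scores.getD k 0)) 0 := by
    rw [pvG, PySem.Dict.items_eq_map_keys scores hn 0, List.foldl_map, ← List.foldl_filter]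
  cases hw : pvWalk root q.toList with
  | none =>
      have hfil : scores.keys.filter (fun k => q.toList.isPrefixOf k.toList) = [] := by
        rw [List.filter_eq_nil_iff]
        intro k hk hpre
        rw [List.isPrefixOf_iff_prefix] at hpre
        obtain ⟨r, hr⟩ := hpre
        have h1 : pvHas root (q.toList ++ r) = false := pvWalk_none_has hw r
        rw [hHas, hr] at h1
        have h2 : scores.keys.any (fun k' => decide (k.toList = k'.toList)) = true :=
          List.any_eq_true.2 ⟨k, hk, by simp⟩
        rw [h2] at h1
        cases h1
      simp only [pvAns, hw, hG, hfil, List.foldl_nil]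
  | some node =>
      have hWFn : pvChWF node.2 := pvWalk_WF hWF hw
      have hperm : ((pvSb node q.toList []).map String.ofList).Perm
          (scores.keys.filter (fun k => q.toList.isPrefixOf k.toList)) := by
        rw [List.perm_ext_iff_of_nodup]
        · intro s
          simp only [List.mem_map, List.mem_filter]
          constructor
          · rintro ⟨x, hx, rfl⟩
            rw [mem_pvSb hWFn] at hx
            obtain ⟨r, hr, rfl⟩ := hx
            rw [pvWalk_some_has hw, hHas] at hr
            obtain ⟨k, hk, hkeq⟩ := List.any_eq_true.1 hr
            have hkeq' : q.toList ++ r = k.toList := of_decide_eq_true hkeq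
            rw [hkeq', String.ofList_toList]
            exact ⟨hk, List.isPrefixOf_iff_prefix.2 ⟨r, hkeq'⟩⟩
          · rintro ⟨hk, hpre⟩
            rw [List.isPrefixOf_iff_prefix] at hpre
            obtain ⟨r, hr⟩ := hpre
            refine ⟨s.toList, ?_, String.ofList_toList⟩
            rw [mem_pvSb hWFn]
            refine ⟨r, ?_, hr.symm⟩
            rw [pvWalk_some_has hw, hHas]
            exact List.any_eq_true.2 ⟨s, hk, by rw [hr]; simp⟩
        · refine List.Nodup.map ?_ (nodup_pvSb hWFn _)
          intro a b h
          rw [← String.toList_ofList (l := a), h, String.toList_ofList]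
        · exact hn.filter _
      letI : RightCommutative (fun (mx : Int) (k : String) => max mx (scores.getD k 0)) :=
        ⟨fun b a₁ a₂ => max_right_comm b (scores.getD a₁ 0) (scores.getD a₂ 0)⟩
      have hfold := hperm.foldl_eq (f := fun mx k => max mx (scores.getD k 0)) 0
      have hstep : (fun (mx : Int) (w : List Char) =>
            if scores.getD (String.ofList w) 0 > mx then scores.getD (String.ofList w) 0 else mx)
          = (fun mx w => max mx (scores.getD (String.ofList w) 0)) := by
        funext mx w
        exact pvIfMax _ _
      simp only [pvAns, hw, hG, hstep]
      rw [← hfold, List.foldl_map]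

-- the cached query loop of A produces map pvAns
theorem pvCacheLoop (scores : PySem.Dict String Int) (root : Bool × PvCh) (qs : List String)
    (acc : List Int) (cache : PySem.Dict String Int)
    (hc : ∀ q, cache.contains q = true → cache.getD q 0 = pvAns scores root q) :
    (qs.foldl (fun (st : List Int × PySem.Dict String Int) query =>
      if st.2.contains query = false then
        match pvWalk root query.toList with
        | none => (st.1 ++ [(0 : Int)], st.2)
        | some node =>
            (st.1 ++ [(pvSb node query.toList []).foldl (fun mx w =>
                if scores.getD (String.ofList w) 0 > mx then scores.getD (String.ofList w) 0 else mx) 0],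
             st.2.insert query ((pvSb node query.toList []).foldl (fun mx w =>
                if scores.getD (String.ofList w) 0 > mx then scores.getD (String.ofList w) 0 else mx) 0))
      else (st.1 ++ [st.2.getD query 0], st.2)) (acc, cache)).1
    = acc ++ qs.map (pvAns scores root) := by
  induction qs generalizing acc cache with
  | nil => simp
  | cons q qs ih =>
      simp only [List.foldl_cons]
      by_cases hctn : cache.contains q = false
      · rw [if_pos hctn]
        cases hw : pvWalk root q.toList with
        | none =>
            rw [ih _ _ hc]
            simp [pvAns, hw]
        | some node =>
            rw [ih]
            · simp [pvAns, hw]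
            · intro q' hq'
              rw [PySem.Dict.contains_insert] at hq'
              by_cases hqq : q' = q
              · subst hqq
                rw [PySem.Dict.getD_insert, if_pos rfl, pvAns, hw]
              · rw [PySem.Dict.getD_insert, if_neg hqq]
                simp [hqq] at hq'
                exact hc q' hq'
      · rw [if_neg hctn, ih _ _ hc, hc q (by revert hctn; cases cache.contains q <;> simp)]
        simp

-- A's "insert 10 if new, += 10 if present" is one insert of getD+10 (same for 1)
theorem pvScoresStep (c : Int) : (fun (sc : PySem.Dict String Int) (word : String) =>
      if sc.contains word = false then sc.insert word c else sc.insert word (sc.getD word 0 + c))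
    = (fun (sc : PySem.Dict String Int) (w : String) => sc.insert w (sc.getD w 0 + c)) := by
  funext sc w
  by_cases h : sc.contains w = false
  · rw [if_pos h, PySem.Dict.getD_of_not_contains sc 0 h, zero_add]
  · rw [if_neg h]

-- ===== VERDICT (by name: the statement is the Claim_ definition above) =====
theorem getAutocompleteScores_spec : Claim_equal_getAutocompleteScores := by
  intro documentTitles documentBodies queries _hdom
  unfold Spec_getAutocompleteScores
  unfold getAutocompleteScores getAutocompleteScores_alt
  simp only [pvScoresStep]
  set S : PySem.Dict String Int := documentBodies.foldl (fun sc body =>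
    (PySem.Str.split₀ body).foldl (fun sc w => sc.insert w (sc.getD w 0 + 1)) sc)
    (documentTitles.foldl (fun sc title =>
      (PySem.Str.split₀ title).foldl (fun sc w => sc.insert w (sc.getD w 0 + 10)) sc) PySem.Dict.empty) with hS
  have hnS : S.keys.Nodup := by
    rw [hS]
    refine pvScoresNodup _ _ _ _ ?_
    refine pvScoresNodup _ _ _ _ ?_
    rw [PySem.Dict.keys_empty]
    exact List.nodup_nil
  rw [pvCacheLoop S _ queries [] PySem.Dict.empty (by
    intro q h
    rw [PySem.Dict.contains_empty] at h
    cases h)]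
  rw [List.nil_append]
  refine List.map_congr_left ?_
  intro q _
  rw [pvAns_eq S hnS q, pvBestOuter S.items PySem.Dict.empty q, PySem.Dict.getD_empty]
  rfl
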